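-- pv_equiv track=rewrite | github.com/wasi0013/leet_code | problems/1664_ways_to_make_a_fair_array.py | waysToMakeFair
-- ===== SOURCE A (Python) =====
-- from typing import List
--
-- def waysToMakeFair(nums: List[int]) -> int:
--     n = len(nums)
--     even_sum = [0] * n
--     odd_sum = [0] * n
--     even_sum[0] = nums[0]
--     for i in range(1, n):
--         if i%2 ==0:
--             even_sum[i] = even_sum[i-1] + nums[i]
--             odd_sum[i] = odd_sum[i-1]
--         else:
--             odd_sum[i] = odd_sum[i-1] + nums[i]
--             even_sum[i] = even_sum[i-1]
--
--     prefix_e, prefix_o = 0, 0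
--
--     ans = 0
--
--     for i in range(n):
--         suffix_e = even_sum[n-1] - even_sum[i]
--         suffix_o = odd_sum[n-1] - odd_sum[i]
--         ans += (prefix_e + suffix_o == prefix_o + suffix_e)
--         prefix_e = even_sum[i]
--         prefix_o = odd_sum[i]
--     return ans
-- ===== SOURCE B (Python) =====
-- from typing import List
--
-- def waysToMakeFair(nums: List[int]) -> int:
--     # Alternating-sum reformulation: removing index i is fair iff
--     # 2*A_i + s_i*nums[i] == T, where A_i = sum_{j<i} (-1)^j nums[j],
--     # s_i = (-1)^i and T = A_n (elements after i flip parity, which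
--     # negates their alternating contribution).
--     total = 0
--     sign = 1
--     for x in nums:
--         total += sign * x
--         sign = -sign
--     ans = 0
--     a = 0
--     sign = 1
--     for x in nums:
--         if 2 * a + sign * x == total:
--             ans += 1
--         a += sign * x
--         sign = -sign
--     return ans
-- ===== Notes on version B (the rewrite author's own statement) =====
-- stated objective: alternative
-- what changed: B replaces A's even/odd prefix-sum arrays and four-way prefix/suffix comparison by a single signed alternating-sum accumulator: removal of index i is fair iff 2*A_i + (-1)^i*nums[i] equals the total alternating sum, checked in one counting pass after a totals pass.
import Mathlib
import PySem

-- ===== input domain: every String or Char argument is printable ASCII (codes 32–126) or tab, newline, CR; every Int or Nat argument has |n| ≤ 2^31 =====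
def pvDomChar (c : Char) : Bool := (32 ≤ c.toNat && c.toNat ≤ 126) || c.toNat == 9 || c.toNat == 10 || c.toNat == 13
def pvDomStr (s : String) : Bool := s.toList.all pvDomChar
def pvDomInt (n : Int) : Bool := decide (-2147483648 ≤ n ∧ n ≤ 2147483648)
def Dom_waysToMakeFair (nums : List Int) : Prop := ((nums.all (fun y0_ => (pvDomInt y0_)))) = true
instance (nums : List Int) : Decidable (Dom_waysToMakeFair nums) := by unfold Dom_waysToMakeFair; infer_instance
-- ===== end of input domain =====

-- B replaces A's even/odd prefix-sum arrays by a single signed alternating-sum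
-- accumulator with the algebraic fairness test 2*a + sign*x == total (objective: alternative).

-- ===== PORT A =====
-- literal transliteration of A: builds even_sum/odd_sum prefix arrays, then scans them.
-- even_sum/odd_sum after '[0]*n' and 'even_sum[0] = nums[0]'
def aInit (nums : List Int) : List Int × List Int :=
  (PySem.List.pySetD (List.replicate nums.length 0) 0 (PySem.List.pyGetD nums 0 0),
   List.replicate nums.length 0)

-- body of A's first loop (state = the pair of arrays)
def aStep1 (nums : List Int) (st : List Int × List Int) (i : Int) : List Int × List Int :=
  if PySem.Int.mod i 2 == 0 then
    (PySem.List.pySetD st.1 i (PySem.List.pyGetD st.1 (i-1) 0 + PySem.List.pyGetD nums i 0),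
     PySem.List.pySetD st.2 i (PySem.List.pyGetD st.2 (i-1) 0))
  else
    (PySem.List.pySetD st.1 i (PySem.List.pyGetD st.1 (i-1) 0),
     PySem.List.pySetD st.2 i (PySem.List.pyGetD st.2 (i-1) 0 + PySem.List.pyGetD nums i 0))

def aArrays (nums : List Int) : List Int × List Int :=
  (PySem.List.pyRange 1 (nums.length : Int) 1).foldl (aStep1 nums) (aInit nums)

-- body of A's second loop (state = (prefix_e, prefix_o, ans))
def aStep2 (n : Int) (es os : List Int) (st : Int × Int × Int) (i : Int) : Int × Int × Int :=
  (PySem.List.pyGetD es i 0, PySem.List.pyGetD os i 0,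
   st.2.2 +
     (if st.1 + (PySem.List.pyGetD os (n-1) 0 - PySem.List.pyGetD os i 0)
         == st.2.1 + (PySem.List.pyGetD es (n-1) 0 - PySem.List.pyGetD es i 0)
      then 1 else 0))

def waysToMakeFair (nums : List Int) : Int :=
  ((PySem.List.pyRange 0 (nums.length : Int) 1).foldl
      (aStep2 (nums.length : Int) (aArrays nums).1 (aArrays nums).2) (0, 0, 0)).2.2

-- ===== PORT B =====
-- literal transliteration of Source B: alternating-total pass, then one counting pass.
-- body of Source B's first loop (state = (total, sign))
def bStep1 (st : Int × Int) (x : Int) : Int × Int := (st.1 + st.2 * x, -st.2)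

def bTotal (nums : List Int) : Int × Int := nums.foldl bStep1 (0, 1)

-- body of Source B's second loop (state = (ans, a, sign))
def bStep2 (t : Int) (st : Int × Int × Int) (x : Int) : Int × Int × Int :=
  ((if 2 * st.2.1 + st.2.2 * x == t then st.1 + 1 else st.1),
   st.2.1 + st.2.2 * x, -st.2.2)

def waysToMakeFair_alt (nums : List Int) : Int :=
  (nums.foldl (bStep2 (bTotal nums).1) (0, 0, 1)).1

-- ===== PRECONDITION & SPEC =====
-- A reads the first element unconditionally, so it raises IndexError exactly on the empty list; Pre_ excludes it.
def Pre_waysToMakeFair (nums : List Int) : Prop := nums ≠ []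
instance (nums : List Int) : Decidable (Pre_waysToMakeFair nums) := by
  unfold Pre_waysToMakeFair; infer_instance

def pvWitness_waysToMakeFair : List Int := [2, 1, 6, 4]

def Spec_waysToMakeFair (nums : List Int) (out : Int) : Prop := out = waysToMakeFair_alt nums
instance (nums : List Int) (out : Int) : Decidable (Spec_waysToMakeFair nums out) := by
  unfold Spec_waysToMakeFair; infer_instance

-- ===== CLAIM (what is proved, stated in full; the proofs are below) =====
def Claim_equal_waysToMakeFair : Prop := ∀ (nums : List Int), Dom_waysToMakeFair nums →
  Pre_waysToMakeFair nums → Spec_waysToMakeFair nums (waysToMakeFair nums)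

-- ===== LEMMAS AND PROOFS =====

-- prefix sum over parity class r of the first k positions
def pref (nums : List Int) (r k : Nat) : Int :=
  ∑ i ∈ Finset.range k, if i % 2 = r then nums.getD i 0 else 0

-- reference count of fair removal indices among the first k
def refC (nums : List Int) (k : Nat) : Int :=
  ∑ i ∈ Finset.range k,
    if pref nums 0 i + (pref nums 1 nums.length - pref nums 1 (i+1))
        = pref nums 1 i + (pref nums 0 nums.length - pref nums 0 (i+1))
    then 1 else 0

-- alternating prefix sum and the running sign
def altA (nums : List Int) (k : Nat) : Int := pref nums 0 k - pref nums 1 k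
def sgn (k : Nat) : Int := if k % 2 = 0 then 1 else -1

-- the value A's arrays hold after i has run up to (but not including) k
def aSpec (nums : List Int) (r k : Nat) : List Int :=
  (List.range nums.length).map (fun j => if j < k then pref nums r (j+1) else 0)

lemma pref_succ (nums : List Int) (r k : Nat) :
    pref nums r (k+1) = pref nums r k + (if k % 2 = r then nums.getD k 0 else 0) :=
  Finset.sum_range_succ _ _

lemma refC_succ (nums : List Int) (k : Nat) :
    refC nums (k+1) = refC nums k +
      (if pref nums 0 k + (pref nums 1 nums.length - pref nums 1 (k+1))
          = pref nums 1 k + (pref nums 0 nums.length - pref nums 0 (k+1))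
       then 1 else 0) :=
  Finset.sum_range_succ _ _

lemma mod_cast_two (k : Nat) : PySem.Int.mod (k : Int) 2 = ((k % 2 : Nat) : Int) := by
  exact_mod_cast PySem.Int.mod_natCast k 2

lemma drop_cons_getD (nums l : List Int) (x : Int) (k : Nat) (h : nums.drop k = x :: l) :
    nums.getD k 0 = x ∧ nums.drop (k+1) = l ∧ k < nums.length := by
  have hk : k < nums.length := by
    by_contra hge
    simp [List.drop_eq_nil_of_le (le_of_not_gt (by omega))] at h
  refine ⟨?_, ?_, hk⟩
  · have h0 : (List.drop k nums)[0]? = (x :: l)[0]? := by rw [h]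
    rw [List.getElem?_drop] at h0
    simp at h0
    simp [List.getD, h0]
  · have : List.drop 1 (List.drop k nums) = List.drop 1 (x :: l) := by rw [h]
    simpa [List.drop_drop, Nat.add_comm] using this

lemma sgn_succ (k : Nat) : sgn (k+1) = -sgn k := by
  unfold sgn
  rcases Nat.mod_two_eq_zero_or_one k with hp | hp <;> simp [Nat.add_mod, hp]

lemma altA_succ (nums : List Int) (k : Nat) :
    altA nums (k+1) = altA nums k + sgn k * nums.getD k 0 := by
  unfold altA sgn
  rcases Nat.mod_two_eq_zero_or_one k with hp | hp <;>
    rw [pref_succ nums 0 k, pref_succ nums 1 k] <;> simp [hp] <;> ring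

lemma bLoop1 (nums : List Int) : ∀ (l : List Int) (k : Nat), nums.drop k = l → ∀ t : Int,
    l.foldl bStep1 (t, sgn k)
      = (t + (altA nums (k + l.length) - altA nums k), sgn (k + l.length)) := by
  intro l
  induction l with
  | nil => intro k h t; simp
  | cons x l ih =>
    intro k h t
    obtain ⟨hx, hd, _⟩ := drop_cons_getD nums l x k h
    rw [List.foldl_cons]
    have hs : bStep1 (t, sgn k) x = (t + sgn k * x, sgn (k+1)) := by
      simp [bStep1, sgn_succ]
    rw [hs, ih (k+1) hd]
    have hlen : k + (x :: l).length = (k+1) + l.length := by simp; omega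
    rw [hlen]
    have ha := altA_succ nums k
    rw [hx] at ha
    simp only [Prod.mk.injEq]
    refine ⟨by rw [ha]; ring, ?_⟩
    trivial

lemma cond_iff (nums : List Int) (k : Nat) :
    (2 * altA nums k + sgn k * nums.getD k 0 = altA nums nums.length)
      ↔ (pref nums 0 k + (pref nums 1 nums.length - pref nums 1 (k+1))
          = pref nums 1 k + (pref nums 0 nums.length - pref nums 0 (k+1))) := by
  have ha := altA_succ nums k
  have h1 : 2 * altA nums k + sgn k * nums.getD k 0
      = altA nums k + altA nums (k+1) := by rw [ha]; ring
  rw [h1]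
  unfold altA
  constructor <;> intro h <;> linarith

lemma bLoop2 (nums : List Int) (T : Int) (hT : T = altA nums nums.length) :
    ∀ (l : List Int) (k : Nat), nums.drop k = l → ∀ ans : Int,
    l.foldl (bStep2 T) (ans, altA nums k, sgn k)
      = (ans + (refC nums (k + l.length) - refC nums k),
         altA nums (k + l.length), sgn (k + l.length)) := by
  intro l
  induction l with
  | nil => intro k h ans; simp
  | cons x l ih =>
    intro k h ans
    obtain ⟨hx, hd, _⟩ := drop_cons_getD nums l x k h
    rw [List.foldl_cons]
    have hcond : (2 * altA nums k + sgn k * x == T)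
        = decide (pref nums 0 k + (pref nums 1 nums.length - pref nums 1 (k+1))
          = pref nums 1 k + (pref nums 0 nums.length - pref nums 0 (k+1))) := by
      rw [hT]
      have := cond_iff nums k
      rw [hx] at this
      rw [Bool.eq_iff_iff]
      simp only [beq_iff_eq, decide_eq_true_eq]
      exact this
    have hs : bStep2 T (ans, altA nums k, sgn k) x
        = (ans + (refC nums (k+1) - refC nums k), altA nums (k+1), sgn (k+1)) := by
      simp only [bStep2, hcond, refC_succ nums k, sgn_succ]
      have ha := altA_succ nums k
      rw [hx] at ha
      split_ifs with hc <;> simp_all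
    rw [hs, ih (k+1) hd]
    have hlen : k + (x :: l).length = (k+1) + l.length := by simp; omega
    rw [hlen]
    simp only [Prod.mk.injEq]
    refine ⟨by ring, ?_⟩
    trivial

lemma pref_zero (nums : List Int) (r : Nat) : pref nums r 0 = 0 := by simp [pref]

lemma refC_zero (nums : List Int) : refC nums 0 = 0 := by simp [refC]

lemma aSpec_getD (nums : List Int) (r k j : Nat) (hj : j < nums.length) :
    (aSpec nums r k).getD j 0 = if j < k then pref nums r (j+1) else 0 := by
  simp [aSpec, List.getD, hj]

lemma aSpec_set (nums : List Int) (r k : Nat) (_hk : k < nums.length) :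
    (aSpec nums r k).set k (pref nums r (k+1)) = aSpec nums r (k+1) := by
  apply List.ext_getElem
  · simp [aSpec]
  · intro j h1 h2
    rw [List.getElem_set]
    simp only [aSpec, List.getElem_map, List.getElem_range]
    split_ifs with e1 e2 e3 e2 e3 <;> first | rfl | omega | (subst e1; rfl)

lemma aInit_eq (nums : List Int) (h : nums ≠ []) :
    aInit nums = (aSpec nums 0 1, aSpec nums 1 1) := by
  have hn : 0 < nums.length := List.length_pos_iff.mpr h
  unfold aInit
  simp only [Prod.mk.injEq]
  constructor
  · rw [PySem.List.pyGetD_zero, PySem.List.pySetD_of_nonneg _ _ le_rfl, Int.toNat_zero]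
    apply List.ext_getElem
    · simp [aSpec]
    · intro j h1 h2
      rw [List.getElem_set]
      simp only [aSpec, List.getElem_map, List.getElem_range, List.getElem_replicate]
      rcases Nat.eq_zero_or_pos j with hj | hj
      · subst hj; simp [pref]
      · simp [Nat.pos_iff_ne_zero.mp hj]
        intro hj0; omega
  · apply List.ext_getElem
    · simp [aSpec]
    · intro j h1 h2
      simp only [aSpec, List.getElem_map, List.getElem_range, List.getElem_replicate]
      split_ifs with hj
      · have : j = 0 := by omega
        subst this; simp [pref]
      · rfl

lemma mod_cast_two' (k : Nat) (hp : k % 2 = 0) : PySem.Int.mod (k : Int) 2 = 0 := by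
  rw [mod_cast_two, hp]; simp

lemma mod_cast_two'' (k : Nat) (hp : k % 2 = 1) : PySem.Int.mod (k : Int) 2 = 1 := by
  rw [mod_cast_two, hp]; simp

lemma aStep1_eq (nums : List Int) (k : Nat) (hk1 : 1 ≤ k) (hkn : k < nums.length) :
    aStep1 nums (aSpec nums 0 k, aSpec nums 1 k) (k : Int)
      = (aSpec nums 0 (k+1), aSpec nums 1 (k+1)) := by
  have hkm : k - 1 < nums.length := by omega
  have hc1 : ((k : Int) - 1) = (((k-1 : Nat)) : Int) := by omega
  have hget : ∀ r : Nat, PySem.List.pyGetD (aSpec nums r k) ((k : Int) - 1) 0 = pref nums r k := by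
    intro r
    rw [hc1, PySem.List.pyGetD_natCast, aSpec_getD nums r k (k-1) hkm]
    have : k - 1 < k := by omega
    simp only [this, if_true]
    congr 1
    omega
  have hnum : PySem.List.pyGetD nums (k : Int) 0 = nums.getD k 0 :=
    PySem.List.pyGetD_natCast ..
  have hset : ∀ (r : Nat) (v : Int),
      PySem.List.pySetD (aSpec nums r k) (k : Int) v = (aSpec nums r k).set k v :=
    fun r v => PySem.List.pySetD_natCast ..
  rcases Nat.mod_two_eq_zero_or_one k with hp | hp
  · rw [aStep1, if_pos (by rw [mod_cast_two' k hp]; rfl)]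
    simp only [hget, hnum, hset]
    have e0 : pref nums 0 k + nums.getD k 0 = pref nums 0 (k+1) := by
      rw [pref_succ, hp]; simp
    have e1 : pref nums 1 k = pref nums 1 (k+1) := by
      rw [pref_succ, hp]; simp
    rw [e0, e1, aSpec_set nums 0 k hkn, aSpec_set nums 1 k hkn]
  · rw [aStep1, if_neg (by rw [mod_cast_two'' k hp]; decide)]
    simp only [hget, hnum, hset]
    have e0 : pref nums 0 k = pref nums 0 (k+1) := by
      rw [pref_succ, hp]; simp
    have e1 : pref nums 1 k + nums.getD k 0 = pref nums 1 (k+1) := by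
      rw [pref_succ, hp]; simp
    rw [e0, e1, aSpec_set nums 0 k hkn, aSpec_set nums 1 k hkn]

lemma aLoop1 (nums : List Int) : ∀ (m k : Nat), 1 ≤ k → k + m = nums.length →
    (PySem.List.pyRange (k : Int) (nums.length : Int) 1).foldl (aStep1 nums)
        (aSpec nums 0 k, aSpec nums 1 k)
      = (aSpec nums 0 nums.length, aSpec nums 1 nums.length) := by
  intro m
  induction m with
  | zero =>
    intro k hk1 hkn
    have : k = nums.length := by omega
    subst this
    rw [PySem.List.pyRange_one_eq_nil le_rfl]
    rfl
  | succ m ih =>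
    intro k hk1 hkn
    have hklt : k < nums.length := by omega
    rw [PySem.List.pyRange_one_cons (by exact_mod_cast hklt), List.foldl_cons,
      aStep1_eq nums k hk1 hklt]
    have hc : (k : Int) + 1 = ((k + 1 : Nat) : Int) := by push_cast; ring
    rw [hc]
    exact ih (k+1) (by omega) (by omega)

lemma aStep2_eq (nums : List Int) (k : Nat)
    (hk : k < nums.length) (st : Int × Int × Int) :
    aStep2 (nums.length : Int) (aSpec nums 0 nums.length) (aSpec nums 1 nums.length)
        st (k : Int)
      = (pref nums 0 (k+1), pref nums 1 (k+1),
         st.2.2 + (if st.1 + (pref nums 1 nums.length - pref nums 1 (k+1))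
             = st.2.1 + (pref nums 0 nums.length - pref nums 0 (k+1)) then 1 else 0)) := by
  have hc1 : ((nums.length : Int) - 1) = (((nums.length - 1 : Nat)) : Int) := by omega
  have hgetL : ∀ r : Nat,
      PySem.List.pyGetD (aSpec nums r nums.length) ((nums.length : Int) - 1) 0
        = pref nums r nums.length := by
    intro r
    rw [hc1, PySem.List.pyGetD_natCast,
      aSpec_getD nums r nums.length (nums.length - 1) (by omega)]
    have h2 : nums.length - 1 < nums.length := by omega
    simp only [h2, if_true]
    congr 1
    omega
  have hgetK : ∀ r : Nat,
      PySem.List.pyGetD (aSpec nums r nums.length) (k : Int) 0 = pref nums r (k+1) := by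
    intro r
    rw [PySem.List.pyGetD_natCast, aSpec_getD nums r nums.length k hk]
    simp [hk]
  simp only [aStep2, hgetL, hgetK, beq_iff_eq]

lemma aLoop2 (nums : List Int) : ∀ (m k : Nat), k + m = nums.length →
    (PySem.List.pyRange (k : Int) (nums.length : Int) 1).foldl
        (aStep2 (nums.length : Int) (aSpec nums 0 nums.length) (aSpec nums 1 nums.length))
        (pref nums 0 k, pref nums 1 k, refC nums k)
      = (pref nums 0 nums.length, pref nums 1 nums.length, refC nums nums.length) := by
  intro m
  induction m with
  | zero =>
    intro k hkn
    have : k = nums.length := by omega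
    subst this
    rw [PySem.List.pyRange_one_eq_nil le_rfl]
    rfl
  | succ m ih =>
    intro k hkn
    have hklt : k < nums.length := by omega
    rw [PySem.List.pyRange_one_cons (by exact_mod_cast hklt), List.foldl_cons,
      aStep2_eq nums k hklt]
    simp only
    rw [← refC_succ]
    have hc : (k : Int) + 1 = ((k + 1 : Nat) : Int) := by push_cast; ring
    rw [hc]
    exact ih (k+1) (by omega)

lemma a_eq_refC (nums : List Int) (h : nums ≠ []) :
    waysToMakeFair nums = refC nums nums.length := by
  have hn : 0 < nums.length := List.length_pos_iff.mpr h
  have harr : aArrays nums = (aSpec nums 0 nums.length, aSpec nums 1 nums.length) := by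
    unfold aArrays
    rw [aInit_eq nums h]
    have h1 : (1 : Int) = ((1 : Nat) : Int) := by norm_num
    rw [h1]
    exact aLoop1 nums (nums.length - 1) 1 le_rfl (by omega)
  have hfold := aLoop2 nums nums.length 0 (by omega)
  rw [Nat.cast_zero] at hfold
  rw [pref_zero, pref_zero, refC_zero] at hfold
  unfold waysToMakeFair
  simp only [harr]
  rw [hfold]

lemma alt_eq_refC (nums : List Int) :
    waysToMakeFair_alt nums = refC nums nums.length := by
  have h1 := bLoop1 nums nums 0 rfl 0
  have hsg0 : sgn 0 = 1 := rfl
  have ha0 : altA nums 0 = 0 := by simp [altA, pref_zero]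
  rw [hsg0, ha0] at h1
  simp only [sub_zero, zero_add] at h1
  have hb : (bTotal nums).1 = altA nums nums.length := by
    unfold bTotal; rw [h1]
  have h2 := bLoop2 nums (bTotal nums).1 hb nums 0 rfl 0
  rw [hsg0, ha0] at h2
  simp only [refC_zero, sub_zero, zero_add] at h2
  unfold waysToMakeFair_alt
  rw [h2]

-- ===== VERDICT =====
theorem waysToMakeFair_spec : Claim_equal_waysToMakeFair := by
  intro nums _ hpre
  unfold Spec_waysToMakeFair
  rw [a_eq_refC nums hpre, alt_eq_refC]
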